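-- pv_equiv track=rewrite | github.com/Tricar5/edu_algo | yandex/sets/set_words.py | getwordindict
-- ===== SOURCE A (Python) =====
-- def getwordindict(dictionary, text):
--     goodwords = set(dictionary)
--
--     for word in dictionary:
--         for delpos in range(len(word)):
--             goodwords.add(word[:delpos] + word[delpos+1:])
--
--     ans = []
--
--     for word in text:
--         ans.append(word in goodwords)
--
--     return ans
-- ===== SOURCE B (Python) =====
-- def getwordindict(dictionary, text):
--     def one_del(d, w):
--         # d is one char longer than w; check d with one char deleted equals w
--         i = 0
--         while i < len(w) and d[i] == w[i]:
--             i += 1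
--         return d[i+1:] == w[i:]
--
--     def check(w):
--         for d in dictionary:
--             if d == w or (len(d) == len(w) + 1 and one_del(d, w)):
--                 return True
--         return False
--
--     return [check(w) for w in text]
-- ===== Notes on version B (the rewrite author's own statement) =====
-- stated objective: alternative
-- what changed: Instead of materializing the set of all one-deletion variants of every dictionary word and testing membership, B scans the dictionary per text word and decides 'one deletion away' by a direct character scan (first mismatch, then suffix comparison), never building variant strings.
import Mathlib
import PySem

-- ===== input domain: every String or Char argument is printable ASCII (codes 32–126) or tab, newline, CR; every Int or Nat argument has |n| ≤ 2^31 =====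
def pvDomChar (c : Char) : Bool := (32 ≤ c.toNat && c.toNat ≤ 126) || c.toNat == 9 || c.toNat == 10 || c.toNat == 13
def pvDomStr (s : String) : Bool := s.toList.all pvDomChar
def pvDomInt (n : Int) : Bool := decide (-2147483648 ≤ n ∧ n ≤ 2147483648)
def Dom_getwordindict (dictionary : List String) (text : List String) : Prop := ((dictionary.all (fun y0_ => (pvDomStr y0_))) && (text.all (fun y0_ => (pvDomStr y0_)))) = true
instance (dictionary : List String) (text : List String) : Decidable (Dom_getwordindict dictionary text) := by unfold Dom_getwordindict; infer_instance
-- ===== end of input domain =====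

-- B replaces A's precomputed set of all one-deletion variants by a per-word scan of the
-- dictionary with a direct character-level one-deletion test; same return value, alternative algorithm.

-- ===== PORT A =====
-- word[:delpos] + word[delpos+1:], ported on code points via PySem slices (exact)
def pvDelposStr (word : String) (dp : Int) : String :=
  String.ofList (PySem.List.slice word.toList none (some dp) ++
                 PySem.List.slice word.toList (some (dp + 1)) none)

def getwordindict (dictionary : List String) (text : List String) : List Bool :=
  let goodwords : PySem.Set String := PySem.Set.ofList dictionary
  let goodwords : PySem.Set String :=
    dictionary.foldl (fun s word =>
      (PySem.List.pyRange 0 (PySem.Str.len word) 1).foldl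
        (fun s dp => PySem.Set.add s (pvDelposStr word dp)) s) goodwords
  text.foldl (fun ans word => ans ++ [PySem.Set.contains goodwords word]) []

-- ===== PORT B =====
-- one_del's while loop as structural recursion on the code points of w (and d in step)
def pvOneDel : List Char → List Char → Bool
  | d, [] => decide (d.drop 1 = [])          -- loop ends with i = len(w); return d[i+1:] == w[i:]
  | [], _ :: _ => false                       -- unreachable: only called with len d = len w + 1 (Python would raise IndexError)
  | c :: ds, x :: ws => if c == x then pvOneDel ds ws else decide (ds = x :: ws)

def getwordindict_alt (dictionary : List String) (text : List String) : List Bool :=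
  text.map (fun w =>
    dictionary.any (fun d =>
      d == w || (decide (d.toList.length = w.toList.length + 1) &&
                 pvOneDel d.toList w.toList)))

-- ===== PRECONDITION & SPEC =====
def Spec_getwordindict (dictionary : List String) (text : List String) (out : List Bool) : Prop := out = getwordindict_alt dictionary text
instance (dictionary : List String) (text : List String) (out : List Bool) : Decidable (Spec_getwordindict dictionary text out) := by unfold Spec_getwordindict; infer_instance

-- ===== CLAIM (what is proved, stated in full; the proofs are below) =====
def Claim_equal_getwordindict : Prop := ∀ (dictionary : List String) (text : List String), Dom_getwordindict dictionary text → Spec_getwordindict dictionary text (getwordindict dictionary text)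

-- ===== LEMMAS AND PROOFS =====

lemma foldl_append_singleton {α β : Type} (f : α → β) (l : List α) (acc : List β) :
    l.foldl (fun ans w => ans ++ [f w]) acc = acc ++ l.map f := by
  induction l generalizing acc with
  | nil => simp
  | cons x xs ih => simp [List.foldl, ih]

-- membership in A's goodwords after the nested variant-adding folds
lemma mem_goodwords (dictionary : List String) (s0 : PySem.Set String) (x : String) :
    x ∈ dictionary.foldl (fun s word =>
        (PySem.List.pyRange 0 (PySem.Str.len word) 1).foldl
          (fun s dp => PySem.Set.add s (pvDelposStr word dp)) s) s0 ↔
      x ∈ s0 ∨ ∃ word ∈ dictionary, ∃ dp ∈ PySem.List.pyRange 0 (PySem.Str.len word) 1,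
        x = pvDelposStr word dp := by
  induction dictionary generalizing s0 with
  | nil => simp
  | cons d ds ih =>
      simp only [List.foldl, ih, PySem.Set.mem_foldl_add, List.mem_cons]
      constructor
      · rintro (((h | ⟨dp, hdp, rfl⟩) | h))
        · exact Or.inl h
        · exact Or.inr ⟨d, Or.inl rfl, dp, hdp, rfl⟩
        · obtain ⟨w, hw, dp, hdp, rfl⟩ := h
          exact Or.inr ⟨w, Or.inr hw, dp, hdp, rfl⟩
      · rintro (h | ⟨w, (rfl | hw), dp, hdp, rfl⟩)
        · exact Or.inl (Or.inl h)
        · exact Or.inl (Or.inr ⟨dp, hdp, rfl⟩)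
        · exact Or.inr ⟨w, hw, dp, hdp, rfl⟩

-- the deletion variant, on code points
lemma delposStr_eq (word : String) (i : Nat) :
    pvDelposStr word (i : Int) =
      String.ofList (word.toList.take i ++ word.toList.drop (i + 1)) := by
  unfold pvDelposStr
  have h1 : ((i : Int) + 1) = ((i + 1 : Nat) : Int) := by push_cast; ring
  rw [h1, PySem.List.slice_to_natCast, PySem.List.slice_from_natCast]

-- correctness of the character-scan one-deletion test
lemma oneDel_iff (d w : List Char) (h : d.length = w.length + 1) :
    pvOneDel d w = true ↔ ∃ i, i < d.length ∧ d.take i ++ d.drop (i + 1) = w := by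
  induction d generalizing w with
  | nil => simp at h
  | cons c ds ih =>
      cases w with
      | nil =>
          have hds : ds = [] := by
            cases ds with
            | nil => rfl
            | cons a as => simp at h
          subst hds
          constructor
          · intro _; exact ⟨0, by simp, by simp⟩
          · intro _; simp [pvOneDel]
      | cons x ws =>
          have h' : ds.length = ws.length + 1 := by
            simp only [List.length_cons] at h; omega
          simp only [pvOneDel]
          by_cases hcx : c = x
          · subst hcx
            simp only [beq_self_eq_true, if_true, ih ws h']
            constructor
            · rintro ⟨i, hi, rfl⟩
              exact ⟨i + 1, by simp only [List.length_cons]; omega, by simp⟩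
            · rintro ⟨i, hi, hdel⟩
              cases i with
              | zero =>
                  simp only [List.take_zero, List.nil_append, List.drop_succ_cons,
                    List.drop_zero] at hdel
                  subst hdel
                  exact ⟨0, by simp, by simp⟩
              | succ j =>
                  simp only [List.length_cons] at hi
                  simp only [List.take_succ_cons, List.cons_append, List.drop_succ_cons,
                    List.cons.injEq, true_and] at hdel
                  exact ⟨j, by omega, hdel⟩
          · have hbe : (c == x) = false := by simp [hcx]
            rw [hbe]
            simp only [Bool.false_eq_true, if_false, decide_eq_true_eq]
            constructor
            · rintro rfl
              exact ⟨0, by simp, by simp⟩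
            · rintro ⟨i, hi, hdel⟩
              cases i with
              | zero => simpa using hdel
              | succ j =>
                  exfalso
                  simp only [List.take_succ_cons, List.cons_append, List.cons.injEq] at hdel
                  exact hcx hdel.1

-- a deletion of d has length d.length - 1
lemma length_of_del (d w : List Char) (i : Nat) (hi : i < d.length)
    (h : d.take i ++ d.drop (i + 1) = w) : d.length = w.length + 1 := by
  have := congrArg List.length h
  simp only [List.length_append, List.length_take, List.length_drop] at this
  omega

-- the per-word booleans agree
lemma pointwise (dictionary : List String) (w : String) :
    PySem.Set.contains
      (dictionary.foldl (fun s word =>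
        (PySem.List.pyRange 0 (PySem.Str.len word) 1).foldl
          (fun s dp => PySem.Set.add s (pvDelposStr word dp)) s)
        (PySem.Set.ofList dictionary)) w =
    dictionary.any (fun d =>
      d == w || (decide (d.toList.length = w.toList.length + 1) &&
                 pvOneDel d.toList w.toList)) := by
  rw [Bool.eq_iff_iff, PySem.Set.contains_iff, mem_goodwords, PySem.Set.mem_ofList,
    List.any_eq_true]
  constructor
  · rintro (hmem | ⟨d, hd, dp, hdp, rfl⟩)
    · exact ⟨w, hmem, by simp⟩
    · rw [PySem.List.mem_pyRange_one] at hdp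
      obtain ⟨h0, hlt⟩ := hdp
      obtain ⟨i, rfl⟩ : ∃ i : Nat, dp = (i : Int) := ⟨dp.toNat, (Int.toNat_of_nonneg h0).symm⟩
      have hilt : i < d.toList.length := by
        have := hlt
        simp only [PySem.Str.len_eq] at this
        exact_mod_cast this
      refine ⟨d, hd, ?_⟩
      rw [delposStr_eq]
      have hdel : d.toList.take i ++ d.toList.drop (i + 1) =
          (String.ofList (d.toList.take i ++ d.toList.drop (i + 1))).toList := by simp
      have hlen := length_of_del d.toList _ i hilt hdel
      rw [Bool.or_eq_true, Bool.and_eq_true, decide_eq_true_eq]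
      right
      refine ⟨by simpa using hlen, ?_⟩
      rw [oneDel_iff _ _ (by simpa using hlen)]
      exact ⟨i, hilt, hdel⟩
  · rintro ⟨d, hd, hb⟩
    rw [Bool.or_eq_true, Bool.and_eq_true, decide_eq_true_eq, beq_iff_eq] at hb
    rcases hb with rfl | ⟨hlen, hone⟩
    · exact Or.inl hd
    · rw [oneDel_iff _ _ hlen] at hone
      obtain ⟨i, hi, hdel⟩ := hone
      right
      refine ⟨d, hd, (i : Int), ?_, ?_⟩
      · rw [PySem.List.mem_pyRange_one]
        constructor
        · positivity
        · simp only [PySem.Str.len_eq]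
          exact_mod_cast hi
      · rw [delposStr_eq, hdel]
        simp

-- ===== VERDICT (by name: the statement is the Claim_ definition above) =====
theorem getwordindict_spec : Claim_equal_getwordindict := by
  intro dictionary text _
  unfold Spec_getwordindict getwordindict getwordindict_alt
  rw [foldl_append_singleton, List.nil_append]
  exact List.map_congr_left (fun w _ => pointwise dictionary w)
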